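-- pv_equiv track=rewrite | github.com/Bipinoli/VeriRISCy | assembler/assembler.py | decode_register
-- ===== SOURCE A (Python) =====
-- def decode_register(reg, line_num):
--     # reg = R0 or R1 or .... R15
--     # input: R5 should give output: 0101
--     num = int(reg[1:])
--     if num > 15 or num < 0:
--         raise Exception(f"line: {line_num} unknown register")
--     num = bin(num)[2:]  # 5 becomes 0b101
--     while len(num) != 4:
--         num = '0' + num
--     return num
-- ===== SOURCE B (Python) =====
-- def decode_register(reg, line_num):
--     # reg = R0 ... R15 ; output is the 4-bit binary string
--     num = int(reg[1:])
--     if num > 15 or num < 0: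
--         raise Exception(f"line: {line_num} unknown register")
--     return ''.join(str((num >> i) & 1) for i in range(3, -1, -1))
-- ===== Notes on version B (the rewrite author's own statement) =====
-- stated objective: simpler
-- what changed: Replaces bin()[2:] plus a zero-padding while-loop with direct extraction of the four bits ((num >> i) & 1 for i = 3..0), producing the fixed-width string in one pass.
import Mathlib
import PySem

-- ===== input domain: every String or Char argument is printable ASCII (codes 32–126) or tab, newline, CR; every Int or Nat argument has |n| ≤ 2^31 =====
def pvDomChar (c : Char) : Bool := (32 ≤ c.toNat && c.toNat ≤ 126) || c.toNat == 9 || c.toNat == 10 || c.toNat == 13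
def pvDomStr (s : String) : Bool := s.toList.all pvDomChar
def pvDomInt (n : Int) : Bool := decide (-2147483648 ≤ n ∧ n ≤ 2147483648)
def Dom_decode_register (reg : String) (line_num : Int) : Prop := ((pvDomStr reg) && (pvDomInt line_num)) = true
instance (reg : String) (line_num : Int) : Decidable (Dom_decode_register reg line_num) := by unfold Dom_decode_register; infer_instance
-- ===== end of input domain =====

-- B builds the 4-bit string by direct bit extraction ((num >> i) & 1 for i = 3..0)
-- instead of bin()[2:] plus a zero-padding while-loop; same value on every admitted input.


-- ===== PORT A =====
-- bin(n)[2:] for n ≥ 0 (exact: Python's bin without the '0b' prefix)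
def pvBinCore : Nat → Nat → List Char   -- fuel n suffices: n halves to 0 within n steps
  | 0, _ => []
  | f+1, n => if n = 0 then [] else pvBinCore f (n / 2) ++ [if n % 2 = 1 then '1' else '0']

def pvBin (n : Nat) : List Char :=
  if n = 0 then ['0'] else pvBinCore n n

-- the while-loop `while len(num) != 4: num = '0' + num`; fuel 4 suffices under Pre_ (len ≤ 4)
def pvPad : Nat → List Char → List Char
  | 0, cs => cs
  | f+1, cs => if cs.length = 4 then cs else pvPad f ('0' :: cs)

def decode_register (reg : String) (line_num : Int) : String :=
  match PySem.Int.ofChars? (PySem.List.slice reg.toList (some 1) none) with   -- int(reg[1:])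
  | none => ""                                   -- ValueError (outside Pre_)
  | some num =>
    if num > 15 || num < 0 then ""               -- raise Exception (outside Pre_)
    else String.mk (pvPad 4 (pvBin num.toNat))

-- ===== PORT B =====
def decode_register_alt (reg : String) (line_num : Int) : String :=
  match PySem.Int.ofChars? (PySem.List.slice reg.toList (some 1) none) with   -- int(reg[1:])
  | none => ""                                   -- ValueError (outside Pre_)
  | some num =>
    if num > 15 || num < 0 then ""               -- raise Exception (outside Pre_)
    else
      -- ''.join(str((num >> i) & 1) for i in range(3, -1, -1))
      String.mk (((PySem.List.pyRange 3 (-1) (-1)).map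
        (fun i => PySem.Int.toChars (PySem.Int.band (num >>> i.toNat) 1))).flatten)

-- ===== PRECONDITION & SPEC =====
-- A raises (ValueError / the custom Exception) exactly when reg[1:] does not parse as an int
-- or the parsed value is outside 0..15; Pre_ admits exactly the other inputs.
def Pre_decode_register (reg : String) (line_num : Int) : Prop :=
  (PySem.Int.ofChars? (PySem.List.slice reg.toList (some 1) none)).isSome = true ∧
  0 ≤ (PySem.Int.ofChars? (PySem.List.slice reg.toList (some 1) none)).getD 0 ∧
  (PySem.Int.ofChars? (PySem.List.slice reg.toList (some 1) none)).getD 0 ≤ 15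
instance (reg : String) (line_num : Int) : Decidable (Pre_decode_register reg line_num) := by
  unfold Pre_decode_register; infer_instance

def pvWitness_decode_register : String × Int := ("R5", 1)

def Spec_decode_register (reg : String) (line_num : Int) (out : String) : Prop := out = decode_register_alt reg line_num
instance (reg : String) (line_num : Int) (out : String) : Decidable (Spec_decode_register reg line_num out) := by unfold Spec_decode_register; infer_instance

-- ===== CLAIM (what is proved, stated in full; the proofs are below) =====
def Claim_equal_decode_register : Prop := ∀ (reg : String) (line_num : Int), Dom_decode_register reg line_num → Pre_decode_register reg line_num → Spec_decode_register reg line_num (decode_register reg line_num)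

-- ===== LEMMAS AND PROOFS =====
-- core: for every register number 0..15 the padded bin-string equals the bit-extracted string
lemma pv_core (n : Int) (h0 : 0 ≤ n) (h15 : n ≤ 15) :
    pvPad 4 (pvBin n.toNat) =
    ((PySem.List.pyRange 3 (-1) (-1)).map
      (fun i => PySem.Int.toChars (PySem.Int.band (n >>> i.toNat) 1))).flatten := by
  interval_cases n <;> decide

-- ===== VERDICT (by name: the statement is the Claim_ definition above) =====
theorem decode_register_spec : Claim_equal_decode_register := by
  intro reg line_num _ hpre
  obtain ⟨hs, h0, h15⟩ := hpre
  unfold Spec_decode_register decode_register decode_register_alt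
  cases h : PySem.Int.ofChars? (PySem.List.slice reg.toList (some 1) none) with
  | none => simp [h] at hs
  | some num =>
    rw [h] at h0 h15
    simp only [Option.getD_some] at h0 h15
    have hcond : (decide (num > 15) || decide (num < 0)) = false := by
      simp; omega
    simp only [hcond, Bool.false_eq_true, if_false]
    exact congrArg String.mk (pv_core num h0 h15)
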